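-- pv_equiv track=rewrite | github.com/pypi-data/pypi-mirror-197 | packages/lafhterlearn/lafhterlearn-0.7.0-py3-none-any.whl/lafhterlearn/ngrams.py | group_by_contexts
-- ===== SOURCE A (Python) =====
-- import itertools
--
-- def group_by_contexts(ngrams_with_counts):
--     groups = itertools.groupby(ngrams_with_counts, key=lambda t: t[0][:-1])
--
--     for context, grouper in groups:
--         counts = []
--         for ngram, count in grouper:
--             token = ngram[-1]
--             counts.append((token, count))
--         yield context, counts
-- ===== SOURCE B (Python) =====
-- def group_by_contexts(ngrams_with_counts):
--     result = []
--     for ngram, count in reversed(list(ngrams_with_counts)):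
--         context = ngram[:-1]
--         pair = (ngram[-1], count)
--         if result and result[0][0] == context:
--             result[0] = (context, [pair] + result[0][1])
--         else:
--             result.insert(0, (context, [pair]))
--     return result
-- ===== Notes on version B (the rewrite author's own statement) =====
-- stated objective: alternative
-- what changed: Instead of scanning forward with groupby (or a running key and flush), B traverses the list in REVERSE and builds the output back-to-front: each item is either merged into the head group of the result-so-far (when its prefix equals that group's context) or prepended as a new group; there is no running key, no sentinel and no end-of-loop flush.
import Mathlib
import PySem

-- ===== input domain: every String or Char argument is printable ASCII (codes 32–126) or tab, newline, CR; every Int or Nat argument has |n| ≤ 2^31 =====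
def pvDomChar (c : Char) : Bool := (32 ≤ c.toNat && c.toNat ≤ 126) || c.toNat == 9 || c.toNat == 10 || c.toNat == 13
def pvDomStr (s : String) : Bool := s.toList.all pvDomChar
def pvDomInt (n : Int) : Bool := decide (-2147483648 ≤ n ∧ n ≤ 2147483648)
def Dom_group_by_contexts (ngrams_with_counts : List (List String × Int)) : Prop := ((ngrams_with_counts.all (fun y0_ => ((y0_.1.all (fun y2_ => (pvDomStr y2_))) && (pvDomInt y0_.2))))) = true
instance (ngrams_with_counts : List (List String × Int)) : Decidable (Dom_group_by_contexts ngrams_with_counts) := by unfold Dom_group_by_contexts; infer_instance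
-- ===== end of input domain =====

-- B traverses the input in reverse and builds the output back-to-front, merging each item
-- into the head group or prepending a new one (objective: alternative decomposition, same cost).
-- A is a generator; equivalence is about the sequence of yielded pairs, listed.

-- ===== PORT A =====
-- itertools.groupby(l, key): consecutive runs of equal key; here key t = t[0][:-1] = dropLast.
-- ngram[-1] is ported as (pyGet? ngram (-1)).getD ""; Pre_ excludes the empty-ngram inputs
-- on which Python raises IndexError, so the default is never reached on admitted inputs.
def pyTok (ng : List String) : String := (PySem.List.pyGet? ng (-1)).getD ""

def runsA : List (List String × Int) → List (List String × List (List String × Int))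
  | [] => []
  | x :: xs =>
    let k := x.1.dropLast
    (k, x :: xs.takeWhile (fun y => y.1.dropLast == k)) ::
      runsA (xs.dropWhile (fun y => y.1.dropLast == k))
termination_by l => l.length
decreasing_by
  simp only [List.length_cons]
  exact Nat.lt_succ_of_le (xs.length_dropWhile_le _)

def group_by_contexts (ngrams_with_counts : List (List String × Int)) : List (List String × (List (String × Int))) :=
  (runsA ngrams_with_counts).map (fun g => (g.1, g.2.map (fun p => (pyTok p.1, p.2))))

-- ===== PORT B =====
-- one step of B's reverse loop: merge into the head group or prepend a new group
def revStep (p : List String × Int) (result : List (List String × List (String × Int))) :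
    List (List String × List (String × Int)) :=
  let context := p.1.dropLast
  let pair := (pyTok p.1, p.2)
  match result with
  | (k, cs) :: rest =>
    if k == context then (context, pair :: cs) :: rest
    else (context, [pair]) :: (k, cs) :: rest
  | [] => [(context, [pair])]

-- 'for … in reversed(list(…))' updating result = a left fold over the reversed list
def group_by_contexts_alt (ngrams_with_counts : List (List String × Int)) : List (List String × (List (String × Int))) :=
  ngrams_with_counts.reverse.foldl (fun result p => revStep p result) []

-- ===== PRECONDITION & SPEC =====
-- Pre_ excludes inputs containing an empty ngram, on which both Pythons raise IndexError
-- at ngram[-1]; A returns no value there.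
def Pre_group_by_contexts (ngrams_with_counts : List (List String × Int)) : Prop :=
  ∀ p ∈ ngrams_with_counts, p.1 ≠ []
instance (ngrams_with_counts : List (List String × Int)) : Decidable (Pre_group_by_contexts ngrams_with_counts) := by unfold Pre_group_by_contexts; infer_instance

def pvWitness_group_by_contexts : (List (List String × Int)) :=
  [(["a", "b"], 2), (["a", "c"], 1), (["x"], 3)]

def Spec_group_by_contexts (ngrams_with_counts : List (List String × Int)) (out : List (List String × (List (String × Int)))) : Prop := out = group_by_contexts_alt ngrams_with_counts
instance (ngrams_with_counts : List (List String × Int)) (out : List (List String × (List (String × Int)))) : Decidable (Spec_group_by_contexts ngrams_with_counts out) := by unfold Spec_group_by_contexts; infer_instance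

-- ===== CLAIM (what is proved, stated in full; the proofs are below) =====
def Claim_equal_group_by_contexts : Prop := ∀ (ngrams_with_counts : List (List String × Int)), Dom_group_by_contexts ngrams_with_counts → Pre_group_by_contexts ngrams_with_counts → Spec_group_by_contexts ngrams_with_counts (group_by_contexts ngrams_with_counts)

-- ===== LEMMAS AND PROOFS =====

-- folding B's step once more equals A's grouping of the extended list
lemma step_cons (x : List String × Int) (xs : List (List String × Int)) :
    revStep x (group_by_contexts xs) = group_by_contexts (x :: xs) := by
  cases xs with
  | nil => simp [group_by_contexts, runsA, revStep]
  | cons y ys =>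
    by_cases h : y.1.dropLast = x.1.dropLast
    · simp [group_by_contexts, revStep, runsA, h]
    · have hb : (y.1.dropLast == x.1.dropLast) = false := beq_eq_false_iff_ne.mpr h
      have hb' : (x.1.dropLast == y.1.dropLast) = false :=
        beq_eq_false_iff_ne.mpr (fun e => h e.symm)
      simp only [group_by_contexts]
      rw [runsA, runsA]
      simp [revStep, hb]
      rw [runsA]
      simp

lemma ab_eq (l : List (List String × Int)) : group_by_contexts l = group_by_contexts_alt l := by
  induction l with
  | nil => simp [group_by_contexts, runsA, group_by_contexts_alt]
  | cons x xs ih =>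
    have : group_by_contexts_alt (x :: xs) = revStep x (group_by_contexts_alt xs) := by
      simp [group_by_contexts_alt]
    rw [this, ← ih, step_cons]

-- ===== VERDICT (by name: the statement is the Claim_ definition above) =====
theorem group_by_contexts_spec : Claim_equal_group_by_contexts := by
  intro l _ _
  exact ab_eq l
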